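-- pv_equiv track=rewrite | github.com/nOOne-is-hier/TIS | SWEA/22576.근의_공식/22576.근의_공식3.py | solve_quadratic_mod5k
-- ===== SOURCE A (Python) =====
-- def solve_quadratic_mod5k(a, b, c, k):
--     """5의 거듭제곱 모듈로에서 이차방정식 해결"""
--     if k == 1:
--         # mod 5에서 완전탐색
--         for x in range(5):
--             if (a * x * x + b * x + c) % 5 == 0:
--                 return x
--         return -1
--
--     x = solve_quadratic_mod5k(a, b, c, k - 1)
--     if x == -1:
--         return -1
--
--     pk = 5 ** k
--     pk_prev = 5 ** (k - 1)
--
--     for i in range(5):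
--         y = x + i * pk_prev
--         if (a * y * y + b * y + c) % pk == 0:
--             return y
--
--     return -1
-- ===== SOURCE B (Python) =====
-- def solve_quadratic_mod5k(a, b, c, k):
--     """Bottom-up iterative Hensel lift mod 5**k (same smallest-root tie-breaking)."""
--     r = -1
--     for x in range(5):
--         if (a * x * x + b * x + c) % 5 == 0:
--             r = x
--             break
--     for level in range(2, k + 1):
--         if r == -1:
--             return -1
--         pk = 5 ** level
--         pk_prev = 5 ** (level - 1)
--         for i in range(5):
--             y = r + i * pk_prev
--             if (a * y * y + b * y + c) % pk == 0:
--                 r = y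
--                 break
--         else:
--             return -1
--     return r
-- ===== Notes on version B (the rewrite author's own statement) =====
-- stated objective: alternative
-- what changed: Replaces A's top-down recursion (k down to the base case) with a bottom-up iterative lift: find the base root mod 5 once, then loop level = 2..k lifting the running root, so no recursion and no call stack.
import Mathlib
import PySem

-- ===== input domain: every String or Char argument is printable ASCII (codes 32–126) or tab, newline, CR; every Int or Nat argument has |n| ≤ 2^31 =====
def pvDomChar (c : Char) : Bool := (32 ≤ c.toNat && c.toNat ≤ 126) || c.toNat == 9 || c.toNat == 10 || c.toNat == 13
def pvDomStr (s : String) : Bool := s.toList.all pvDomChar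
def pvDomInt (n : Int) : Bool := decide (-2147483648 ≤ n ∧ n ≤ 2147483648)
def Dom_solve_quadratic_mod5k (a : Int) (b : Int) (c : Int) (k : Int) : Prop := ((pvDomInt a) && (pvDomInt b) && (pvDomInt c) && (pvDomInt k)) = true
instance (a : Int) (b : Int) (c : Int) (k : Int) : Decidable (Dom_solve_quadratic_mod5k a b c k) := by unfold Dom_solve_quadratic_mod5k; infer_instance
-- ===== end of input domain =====

-- B replaces A's top-down recursion with a bottom-up iterative Hensel lift (base root mod 5, then lift level 2..k); same return values on k >= 1.


-- ===== PORT A =====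
-- shared inner scans (the same loops appear verbatim in both Pythons):
-- for x in range(5): if (a*x*x+b*x+c) % 5 == 0: return x / else -1
def aBaseScan (a b c : Int) : List Int → Int
  | [] => -1
  | x :: xs => if PySem.Int.mod (a * x * x + b * x + c) 5 = 0 then x else aBaseScan a b c xs

-- for i in range(5): y = x + i*pk_prev; if (a*y*y+b*y+c) % pk == 0: return y / else -1
def aLiftScan (a b c x pk pkp : Int) : List Int → Int
  | [] => -1
  | i :: is =>
      let y := x + i * pkp
      if PySem.Int.mod (a * y * y + b * y + c) pk = 0 then y else aLiftScan a b c x pk pkp is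

-- the 'k < 1 → -1' branch is only a totality guard: Python recurses without bound there
-- (RecursionError), and Pre_ excludes those inputs.
def solve_quadratic_mod5k (a : Int) (b : Int) (c : Int) (k : Int) : Int :=
  if k = 1 then aBaseScan a b c (PySem.List.pyRange 0 5 1)
  else if k < 1 then -1
  else
    let x := solve_quadratic_mod5k a b c (k - 1)
    if x = -1 then -1
    else aLiftScan a b c x (5 ^ k.toNat) (5 ^ (k - 1).toNat) (PySem.List.pyRange 0 5 1)
termination_by k.toNat
decreasing_by omega

-- ===== PORT B =====
-- the level loop: once r = -1 it is returned unchanged, matching B's early 'return -1'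
def bStep (a b c : Int) (r level : Int) : Int :=
  if r = -1 then -1
  else aLiftScan a b c r (5 ^ level.toNat) (5 ^ (level - 1).toNat) (PySem.List.pyRange 0 5 1)

def solve_quadratic_mod5k_alt (a : Int) (b : Int) (c : Int) (k : Int) : Int :=
  let r0 := aBaseScan a b c (PySem.List.pyRange 0 5 1)
  (PySem.List.pyRange 2 (k + 1) 1).foldl (bStep a b c) r0

-- ===== PRECONDITION & SPEC =====
-- Pre_ excludes k ≤ 0, where Python A recurses without bound (RecursionError).
def Pre_solve_quadratic_mod5k (a : Int) (b : Int) (c : Int) (k : Int) : Prop := 1 ≤ k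
instance (a : Int) (b : Int) (c : Int) (k : Int) : Decidable (Pre_solve_quadratic_mod5k a b c k) := by unfold Pre_solve_quadratic_mod5k; infer_instance
def pvWitness_solve_quadratic_mod5k : Int × Int × Int × Int := (1, 1, 1, 2)

def Spec_solve_quadratic_mod5k (a : Int) (b : Int) (c : Int) (k : Int) (out : Int) : Prop := out = solve_quadratic_mod5k_alt a b c k
instance (a : Int) (b : Int) (c : Int) (k : Int) (out : Int) : Decidable (Spec_solve_quadratic_mod5k a b c k out) := by unfold Spec_solve_quadratic_mod5k; infer_instance

-- ===== CLAIM (what is proved, stated in full; the proofs are below) =====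
def Claim_equal_solve_quadratic_mod5k : Prop := ∀ (a : Int) (b : Int) (c : Int) (k : Int), Dom_solve_quadratic_mod5k a b c k → Pre_solve_quadratic_mod5k a b c k → Spec_solve_quadratic_mod5k a b c k (solve_quadratic_mod5k a b c k)
-- ===== LEMMAS AND PROOFS =====

theorem main_eq (a b c : Int) : ∀ (k : Int), 1 ≤ k →
    solve_quadratic_mod5k a b c k = solve_quadratic_mod5k_alt a b c k := by
  intro k hk
  induction k, hk using Int.le_induction with
  | base =>
      rw [solve_quadratic_mod5k]
      simp [solve_quadratic_mod5k_alt, PySem.List.pyRange_zero]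
  | succ n hn ih =>
      rw [solve_quadratic_mod5k]
      have h1 : n + 1 - 1 = n := by ring
      simp only [h1, show ¬(n + 1 = 1) by omega, show ¬(n + 1 < 1) by omega, if_false]
      rw [solve_quadratic_mod5k_alt,
          PySem.List.pyRange_one_succ_right (by omega : (2 : Int) ≤ n + 1),
          List.foldl_append, List.foldl_cons, List.foldl_nil]
      have ihv : solve_quadratic_mod5k a b c n = solve_quadratic_mod5k_alt a b c n := ih
      rw [solve_quadratic_mod5k_alt] at ihv
      rw [← ihv, bStep, h1]

-- ===== VERDICT (by name: the statement is the Claim_ definition above) =====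
theorem solve_quadratic_mod5k_spec : Claim_equal_solve_quadratic_mod5k := by
  intro a b c k _ hk
  unfold Spec_solve_quadratic_mod5k
  exact main_eq a b c k hk
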